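-- pv_equiv track=rewrite | github.com/egor-karitskiy/algorythms | 14/14.I.py | colored_clothes
-- ===== SOURCE A (Python) =====
-- def colored_clothes(array):
--     pinks = []
--     yellows = []
--     raspberries = []
--     for el in array:
--         if el == 0:
--             pinks.append(el)
--         elif el == 1:
--             yellows.append(el)
--         else:
--             raspberries.append(el)
--     return pinks + yellows + raspberries
-- ===== SOURCE B (Python) =====
-- def colored_clothes(array):
--     return sorted(array, key=lambda x: 0 if x == 0 else (1 if x == 1 else 2))
-- ===== Notes on version B (the rewrite author's own statement) =====
-- stated objective: simpler
-- what changed: Replaces the three explicit bucket lists and their concatenation with a single stable sort under a 3-valued key (0 for zeros, 1 for ones, 2 for the rest); stability reproduces A's order exactly.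
import Mathlib
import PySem

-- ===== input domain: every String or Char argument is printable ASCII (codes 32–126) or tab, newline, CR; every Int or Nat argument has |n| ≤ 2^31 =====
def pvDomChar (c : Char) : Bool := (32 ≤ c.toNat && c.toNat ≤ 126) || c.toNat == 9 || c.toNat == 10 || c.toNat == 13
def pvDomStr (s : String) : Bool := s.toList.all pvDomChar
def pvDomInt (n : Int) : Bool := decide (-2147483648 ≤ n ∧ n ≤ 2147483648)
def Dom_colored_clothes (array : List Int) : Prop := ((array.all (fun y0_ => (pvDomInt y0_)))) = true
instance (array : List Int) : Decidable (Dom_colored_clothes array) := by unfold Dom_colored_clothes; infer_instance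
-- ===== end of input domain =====

-- B replaces A's three explicit buckets + concatenation by one stable sort under a 3-valued key (simpler; not faster).


-- ===== PORT A =====
def colored_clothes (array : List Int) : List Int :=
  let s := array.foldl
    (fun (acc : List Int × List Int × List Int) el =>
      if el = 0 then (acc.1 ++ [el], acc.2.1, acc.2.2)
      else if el = 1 then (acc.1, acc.2.1 ++ [el], acc.2.2)
      else (acc.1, acc.2.1, acc.2.2 ++ [el]))
    ([], [], [])
  s.1 ++ s.2.1 ++ s.2.2

-- ===== PORT B =====
-- the sort key:  lambda x: 0 if x == 0 else (1 if x == 1 else 2)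
def pvKey (x : Int) : Int := if x = 0 then 0 else if x = 1 then 1 else 2

def colored_clothes_alt (array : List Int) : List Int :=
  PySem.List.sorted array pvKey

-- ===== PRECONDITION & SPEC =====
def Spec_colored_clothes (array : List Int) (out : List Int) : Prop := out = colored_clothes_alt array
instance (array : List Int) (out : List Int) : Decidable (Spec_colored_clothes array out) := by unfold Spec_colored_clothes; infer_instance

-- ===== CLAIM (what is proved, stated in full; the proofs are below) =====
def Claim_equal_colored_clothes : Prop := ∀ (array : List Int), Dom_colored_clothes array → Spec_colored_clothes array (colored_clothes array)

-- ===== LEMMAS AND PROOFS =====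

-- the common normal form: the three buckets, expressed as filters
def pvBuckets (xs : List Int) : List Int :=
  xs.filter (fun x => decide (x = 0)) ++ xs.filter (fun x => decide (x = 1))
    ++ xs.filter (fun x => decide (x ≠ 0 ∧ x ≠ 1))

theorem pv_insertBy_skip {α : Type} (before : α → α → Bool) (x : α) (ys zs : List α)
    (h : ∀ y ∈ ys, before x y = false) :
    PySem.List.insertBy before x (ys ++ zs) = ys ++ PySem.List.insertBy before x zs := by
  induction ys with
  | nil => simp
  | cons y ys ih =>
      simp only [List.cons_append, PySem.List.insertBy, h y (by simp)]
      simp [ih (fun y hy => h y (by simp [hy]))]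

theorem pv_insertBy_front {α : Type} (before : α → α → Bool) (x : α) (ys : List α)
    (h : ∀ y ∈ ys, before x y = true) :
    PySem.List.insertBy before x ys = x :: ys := by
  cases ys with
  | nil => rfl
  | cons y ys => simp [PySem.List.insertBy, h y (by simp)]

theorem pv_insert_keyed (x : Int) (A B C : List Int)
    (hA : ∀ a ∈ A, pvKey a = 0) (hB : ∀ b ∈ B, pvKey b = 1) (hC : ∀ c ∈ C, pvKey c = 2) :
    PySem.List.insertBy (fun a b => decide (pvKey a < pvKey b)) x (A ++ B ++ C) =
      if x = 0 then A ++ x :: (B ++ C)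
      else if x = 1 then A ++ B ++ x :: C
      else A ++ B ++ C ++ [x] := by
  by_cases h0 : x = 0
  · have hk : pvKey x = 0 := by simp [pvKey, h0]
    rw [List.append_assoc,
      pv_insertBy_skip _ x A (B ++ C) (fun a ha => by simp [hA a ha, hk]),
      pv_insertBy_front _ x (B ++ C) (fun y hy => by
        rcases List.mem_append.mp hy with hy | hy
        · simp [hB y hy, hk]
        · simp [hC y hy, hk])]
    simp [h0]
  · by_cases h1 : x = 1
    · have hk : pvKey x = 1 := by simp [pvKey, h1]
      rw [List.append_assoc,
        pv_insertBy_skip _ x A (B ++ C) (fun a ha => by simp [hA a ha, hk]),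
        pv_insertBy_skip _ x B C (fun b hb => by simp [hB b hb, hk]),
        pv_insertBy_front _ x C (fun c hc => by simp [hC c hc, hk])]
      simp [h0, h1]
    · have hk : pvKey x = 2 := by simp [pvKey, h0, h1]
      rw [PySem.List.insertBy_of_forall_not_before _ x (A ++ B ++ C) (fun y hy => by
        rcases List.mem_append.mp hy with hy | hy
        · rcases List.mem_append.mp hy with hy | hy
          · simp [hA y hy, hk]
          · simp [hB y hy, hk]
        · simp [hC y hy, hk])]
      simp [h0, h1]

theorem pv_alt_eq_buckets (xs : List Int) : colored_clothes_alt xs = pvBuckets xs := by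
  induction xs using List.reverseRecOn with
  | nil => rfl
  | append_singleton xs x ih =>
      unfold colored_clothes_alt at *
      rw [PySem.List.sorted_eq_foldl_insertBy] at *
      rw [List.foldl_append, List.foldl_cons, List.foldl_nil, ih]
      unfold pvBuckets
      rw [pv_insert_keyed x _ _ _
        (fun a ha => by
          have := (List.mem_filter.mp ha).2
          simp at this; simp [pvKey, this])
        (fun b hb => by
          have := (List.mem_filter.mp hb).2
          simp at this; simp [pvKey, this])
        (fun c hc => by
          have := (List.mem_filter.mp hc).2
          simp at this; simp [pvKey, this.1, this.2])]
      simp only [List.filter_append, List.filter_cons, List.filter_nil]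
      by_cases h0 : x = 0
      · simp [h0]
      · by_cases h1 : x = 1
        · simp [h0, h1]
        · simp [h0, h1]

theorem pv_a_foldl (xs : List Int) (p y r : List Int) :
    xs.foldl
      (fun (acc : List Int × List Int × List Int) el =>
        if el = 0 then (acc.1 ++ [el], acc.2.1, acc.2.2)
        else if el = 1 then (acc.1, acc.2.1 ++ [el], acc.2.2)
        else (acc.1, acc.2.1, acc.2.2 ++ [el]))
      (p, y, r) =
      (p ++ xs.filter (fun x => decide (x = 0)), y ++ xs.filter (fun x => decide (x = 1)),
        r ++ xs.filter (fun x => decide (x ≠ 0 ∧ x ≠ 1))) := by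
  induction xs generalizing p y r with
  | nil => simp
  | cons el xs ih =>
      by_cases h0 : el = 0
      · simp [h0, ih]
      · by_cases h1 : el = 1
        · simp [h0, h1, ih]
        · simp [h0, h1, ih]

theorem pv_a_eq_buckets (xs : List Int) : colored_clothes xs = pvBuckets xs := by
  unfold colored_clothes pvBuckets
  rw [pv_a_foldl]
  simp

-- ===== VERDICT (by name: the statement is the Claim_ definition above) =====
theorem colored_clothes_spec : Claim_equal_colored_clothes := by
  intro array _
  unfold Spec_colored_clothes
  rw [pv_a_eq_buckets, pv_alt_eq_buckets]
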